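-- pv_equiv track=rewrite | github.com/MForofontov/Python-functions | compression_functions/decompress_number.py | decompress_number
-- ===== SOURCE A (Python) =====
-- from typing import Tuple
--
-- def decompress_number(text: str, index: int) -> Tuple[int, int]:
--     """
--     Decompress a number from a polyline-encoded string.
--
--     Parameters
--     ----------
--     text : str
--         The polyline-encoded string.
--     index : int
--         The current index in the string to start decoding from.
--
--     Returns
--     -------
--     Tuple[int, int]
--         Index to start decoding the next number and the number decoded
--         in the current function call.
--
--     Raises
--     ------
--     TypeError
--         If text is not a string or index is not an integer.
--     """
--     if not isinstance(text, str):
--         raise TypeError("text must be a string")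
--     if not isinstance(index, int):
--         raise TypeError("index must be an integer")
--
--     number: int = 0
--     bitwise_shift: int = 0
--
--     while True:
--         n: int = (ord(text[index]) - 63)
--         index += 1
--         number |= (n & 0x1F) << bitwise_shift
--         bitwise_shift += 5
--         if n < 0x20:
--             break
--
--     return index, (~number >> 1) if (number & 1) else (number >> 1)
-- ===== SOURCE B (Python) =====
-- from typing import Tuple
--
-- def decompress_number(text: str, index: int) -> Tuple[int, int]:
--     """Decode one polyline varint: locate the terminator first, then fold the
--     span back-to-front (Horner, base 32) and zigzag-decode."""
--     if not isinstance(text, str):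
--         raise TypeError("text must be a string")
--     if not isinstance(index, int):
--         raise TypeError("index must be an integer")
--
--     i = index
--     while ord(text[i]) - 63 >= 0x20:
--         i += 1
--
--     number = 0
--     for j in reversed(range(index, i + 1)):
--         number = (number << 5) | (ord(text[j]) - 63 & 0x1F)
--
--     return i + 1, (~number >> 1) if (number & 1) else (number >> 1)
-- ===== Notes on version B (the rewrite author's own statement) =====
-- stated objective: alternative
-- what changed: A decodes in one forward read-accumulate loop carrying a running 5-bit shift; B first scans for the terminator position, then folds the located span back-to-front by base-32 Horner steps with no shift bookkeeping, sharing only the final zigzag step.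
import Mathlib
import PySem

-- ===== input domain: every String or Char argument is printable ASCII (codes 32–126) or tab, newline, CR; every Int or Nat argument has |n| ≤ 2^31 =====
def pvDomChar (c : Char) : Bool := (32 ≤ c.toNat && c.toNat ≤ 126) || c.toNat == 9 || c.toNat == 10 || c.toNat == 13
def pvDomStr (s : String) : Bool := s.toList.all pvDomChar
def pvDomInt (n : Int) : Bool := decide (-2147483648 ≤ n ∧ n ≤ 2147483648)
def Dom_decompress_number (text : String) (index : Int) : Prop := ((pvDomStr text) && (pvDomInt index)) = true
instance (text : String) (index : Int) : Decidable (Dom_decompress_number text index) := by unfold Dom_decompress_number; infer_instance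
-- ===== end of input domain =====

-- B locates the terminator first, then folds the located span back-to-front (Horner, base 32)
-- instead of A's single forward read-accumulate loop with a running shift; objective: alternative decomposition.


-- ===== PORT A =====
-- A's `while True` loop; `fuel` only bounds the recursion (under Pre_ the loop always hits a
-- terminator within the fuel; both `(0,0)` branches are Python's IndexError, excluded by Pre_).
-- `shift` is Python's `bitwise_shift`: always a nonnegative multiple of 5, carried as a Nat
-- (exact on every reachable state).
def pvLoopA (t : List Char) (idx num : Int) (shift : Nat) (fuel : Nat) : Int × Int :=
  match fuel with
  | 0 => (0, 0)
  | fuel + 1 =>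
    match PySem.List.pyGet? t idx with
    | none => (0, 0)  -- IndexError in Python
    | some c =>
      let n : Int := (c.toNat : Int) - 63
      let idx' := idx + 1
      let num' := PySem.Int.bor num ((PySem.Int.band n 31) <<< shift)
      if n < 32 then
        (idx', if PySem.Int.band num' 1 ≠ 0 then (Int.not num') >>> 1 else num' >>> 1)
      else
        pvLoopA t idx' num' (shift + 5) fuel

def decompress_number (text : String) (index : Int) : Int × Int :=
  pvLoopA text.toList index 0 0 (2 * text.toList.length + 1)

-- ===== PORT B =====
-- one 5-bit digit of the encoding: `ord(text[j]) - 63 & 0x1F` (the `getD ' '` default is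
-- unreachable: B only reads positions its scan already read successfully)
def pvDig (t : List Char) (j : Int) : Int :=
  PySem.Int.band ((((PySem.List.pyGet? t j).getD ' ').toNat : Int) - 63) 31

-- B's boundary scan: `while ord(text[i]) - 63 >= 0x20: i += 1`; none = IndexError (excluded by Pre_)
def pvScan (t : List Char) (i : Int) (fuel : Nat) : Option Int :=
  match fuel with
  | 0 => none
  | fuel + 1 =>
    match PySem.List.pyGet? t i with
    | none => none
    | some c => if (c.toNat : Int) - 63 ≥ 32 then pvScan t (i + 1) fuel else some i

def decompress_number_alt (text : String) (index : Int) : Int × Int :=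
  let t := text.toList
  match pvScan t index (2 * t.length + 1) with
  | none => (0, 0)  -- Python raises IndexError here; excluded by Pre_
  | some i =>
    let number :=
      ((PySem.List.pyRange index (i + 1) 1).reverse).foldl
        (fun acc j => PySem.Int.bor (acc <<< (5:Nat)) (pvDig t j)) 0
    (i + 1, if PySem.Int.band number 1 ≠ 0 then (Int.not number) >>> 1 else number >>> 1)

-- ===== PRECONDITION & SPEC =====
-- true iff position j of t (Python indexing, negative allowed) holds a terminator byte
def pvIsTerm (t : List Char) (j : Int) : Bool :=
  match PySem.List.pyGet? t j with
  | some c => decide ((c.toNat : Int) - 63 < 32)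
  | none => false

-- exactly the inputs on which A returns: the start index is in Python range and a terminator
-- byte occurs at or after it, so the loop stops before running off the end (else IndexError)
def Pre_decompress_number (text : String) (index : Int) : Prop :=
  -(text.toList.length : Int) ≤ index ∧
  ∃ j ∈ PySem.List.pyRange index (text.toList.length : Int) 1, pvIsTerm text.toList j = true
instance (text : String) (index : Int) : Decidable (Pre_decompress_number text index) := by
  unfold Pre_decompress_number; infer_instance

def pvWitness_decompress_number : String × Int := ("?", 0)

def Spec_decompress_number (text : String) (index : Int) (out : Int × Int) : Prop := out = decompress_number_alt text index
instance (text : String) (index : Int) (out : Int × Int) : Decidable (Spec_decompress_number text index out) := by unfold Spec_decompress_number; infer_instance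

-- ===== CLAIM (what is proved, stated in full; the proofs are below) =====
def Claim_equal_decompress_number : Prop := ∀ (text : String) (index : Int), Dom_decompress_number text index → Pre_decompress_number text index → Spec_decompress_number text index (decompress_number text index)

-- ===== LEMMAS AND PROOFS =====

-- the value encoded by the span [a, j]: little-endian base-32 Horner over its digits
def pvH (t : List Char) (a j : Int) : Int :=
  ((PySem.List.pyRange a (j + 1) 1).map (pvDig t)).foldr (fun d acc => acc * 32 + d) 0

theorem pv_nat_lor (k : Nat) : ∀ a b : Nat, a < 2 ^ k → a ||| b * 2 ^ k = a + b * 2 ^ k := by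
  induction k with
  | zero => intro a b h; interval_cases a; simp
  | succ k ih =>
    intro a b h
    have hbit : Nat.bit (a.testBit 0) (a >>> 1) = a := Nat.bit_testBit_zero_shiftRight_one a
    have h2 : b * 2 ^ (k + 1) = Nat.bit false (b * 2 ^ k) := by
      simp [Nat.bit]; ring
    rw [← hbit, h2, Nat.lor_bit]
    have ha2 : a >>> 1 < 2 ^ k := by
      rw [Nat.shiftRight_one]; omega
    rw [ih _ b ha2]
    rw [Nat.shiftRight_one] at *
    cases hr : a.testBit 0 <;> simp [Nat.bit, hr] at * <;> omega

theorem pv_lor_shift (a b : Int) (k : Nat) (ha : 0 ≤ a) (hb : 0 ≤ b) (h : a < 2 ^ k) :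
    PySem.Int.bor a (b <<< k) = a + b * 2 ^ k := by
  obtain ⟨A, rfl⟩ := Int.eq_ofNat_of_zero_le ha
  obtain ⟨B, rfl⟩ := Int.eq_ofNat_of_zero_le hb
  have h1 : A < 2 ^ k := by exact_mod_cast h
  have h2 : ((B : Int)) <<< k = ((B * 2 ^ k : Nat) : Int) := by
    rw [Int.shiftLeft_eq]; push_cast; ring
  rw [h2, PySem.Int.bor_natCast, pv_nat_lor k _ _ h1]
  push_cast; ring

theorem pv_band31 (n : Int) : 0 ≤ PySem.Int.band n 31 ∧ PySem.Int.band n 31 ≤ 31 := by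
  have h31 : (31 : Int).toNat = 31 := rfl
  unfold PySem.Int.band
  split_ifs with h1 h2 h2
  · have := Nat.and_le_right (n := n.toNat) (m := (31:Int).toNat)
    rw [h31] at this ⊢
    omega
  · omega
  · rw [h31]; omega
  · omega

theorem pv_get_some (t : List Char) (i : Int) (h1 : -(t.length:Int) ≤ i) (h2 : i < t.length) :
    (PySem.List.pyGet? t i).isSome := by
  simp only [PySem.List.pyGet?, PySem.List.pyIdx?]
  split_ifs <;> simp_all <;> omega

theorem pvScan_sound (t : List Char) :
    ∀ fuel idx j, pvScan t idx fuel = some j →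
      idx ≤ j ∧ j < idx + (fuel : Int) ∧ pvIsTerm t j = true ∧
      ∀ k, idx ≤ k → k < j → (PySem.List.pyGet? t k).isSome ∧ pvIsTerm t k = false := by
  intro fuel
  induction fuel with
  | zero => intro idx j h; simp [pvScan] at h
  | succ fuel ih =>
    intro idx j h
    simp only [pvScan] at h
    cases hget : PySem.List.pyGet? t idx with
    | none => rw [hget] at h; simp at h
    | some c =>
      rw [hget] at h
      simp only at h
      by_cases hc : (c.toNat : Int) - 63 ≥ 32
      · rw [if_pos hc] at h
        obtain ⟨h1, h1', h2, h3⟩ := ih (idx + 1) j h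
        refine ⟨by omega, by push_cast at h1' ⊢; omega, h2, ?_⟩
        intro k hk1 hk2
        rcases eq_or_lt_of_le hk1 with rfl | hlt
        · exact ⟨by simp [hget], by simp [pvIsTerm, hget]; omega⟩
        · exact h3 k (by omega) hk2
      · rw [if_neg hc] at h
        obtain rfl : idx = j := by simpa using h
        exact ⟨le_refl _, by push_cast; omega,
               by simp [pvIsTerm, hget]; omega, fun k hk1 hk2 => by omega⟩

theorem pvScan_complete (t : List Char) :
    ∀ (fuel : Nat) idx j, -(t.length:Int) ≤ idx → idx ≤ j → j < (t.length : Int) →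
      pvIsTerm t j = true → (t.length : Int) - idx < (fuel : Int) →
      ∃ j', pvScan t idx fuel = some j' := by
  intro fuel
  induction fuel with
  | zero => intro idx j _ h1 h2 _ hf; simp at hf; omega
  | succ fuel ih =>
    intro idx j hlo h1 h2 hterm hf
    have hsome := pv_get_some t idx hlo (by omega)
    obtain ⟨c, hget⟩ := Option.isSome_iff_exists.mp hsome
    by_cases hc : (c.toNat : Int) - 63 ≥ 32
    · have hne : idx ≠ j := by
        intro heq; rw [← heq, pvIsTerm, hget] at hterm; simp at hterm; omega
      obtain ⟨j', hj'⟩ := ih (idx + 1) j (by omega) (by omega) h2 hterm (by push_cast at hf ⊢; omega)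
      exact ⟨j', by simp only [pvScan, hget]; rw [if_pos hc]; exact hj'⟩
    · exact ⟨idx, by simp only [pvScan, hget]; rw [if_neg hc]⟩

theorem pvH_cons (t : List Char) (a j : Int) (h : a ≤ j) :
    pvH t a j = pvH t (a+1) j * 32 + pvDig t a := by
  rw [pvH, PySem.List.pyRange_one_cons (by omega)]
  simp [pvH]

theorem pvH_single (t : List Char) (j : Int) : pvH t j j = pvDig t j := by
  rw [pvH, PySem.List.pyRange_one_cons (by omega), PySem.List.pyRange_one_eq_nil (by omega)]
  simp

theorem pv_foldr_bor (t : List Char) (l : List Int) :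
    0 ≤ l.foldr (fun j acc => acc * 32 + pvDig t j) 0 ∧
    l.foldr (fun j acc => PySem.Int.bor (acc <<< (5:Nat)) (pvDig t j)) 0
      = l.foldr (fun j acc => acc * 32 + pvDig t j) 0 := by
  induction l with
  | nil => simp
  | cons x xs ih =>
    obtain ⟨h0, heq⟩ := ih
    have hd : 0 ≤ pvDig t x ∧ pvDig t x ≤ 31 := pv_band31 _
    constructor
    · simp only [List.foldr_cons]
      have : (0:Int) ≤ pvDig t x := hd.1
      nlinarith
    · simp only [List.foldr_cons, heq]
      rw [PySem.Int.bor_comm, pv_lor_shift _ _ 5 hd.1 h0 (by have := hd.2; norm_num; omega)]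
      ring

theorem pvB_fold (t : List Char) (idx j : Int) :
    ((PySem.List.pyRange idx (j + 1) 1).reverse).foldl
        (fun acc k => PySem.Int.bor (acc <<< (5:Nat)) (pvDig t k)) 0 = pvH t idx j := by
  rw [List.foldl_reverse, pvH, List.foldr_map]
  exact (pv_foldr_bor t _).2

theorem pvLoopA_run (t : List Char) (j : Int) (hterm : pvIsTerm t j = true) :
    ∀ (fuel : Nat) idx (num : Int) (shift : Nat),
      idx ≤ j → (j - idx) < (fuel : Int) → 0 ≤ num → num < 2 ^ shift →
      (∀ k, idx ≤ k → k < j → (PySem.List.pyGet? t k).isSome ∧ pvIsTerm t k = false) →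
      pvLoopA t idx num shift fuel =
        (j + 1, let n := num + pvH t idx j * 2 ^ shift
                if PySem.Int.band n 1 ≠ 0 then (Int.not n) >>> 1 else n >>> 1) := by
  intro fuel
  induction fuel with
  | zero => intro idx num shift h1 h2; omega
  | succ fuel ih =>
    intro idx num shift h1 h2 hnum0 hnumlt h3
    rcases eq_or_lt_of_le h1 with rfl | hlt
    · -- idx = j : terminator step
      have hget : ∃ c, PySem.List.pyGet? t idx = some c := by
        unfold pvIsTerm at hterm
        cases hg : PySem.List.pyGet? t idx with
        | none => rw [hg] at hterm; simp at hterm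
        | some c => exact ⟨c, rfl⟩
      obtain ⟨c, hget⟩ := hget
      have hc : (c.toNat : Int) - 63 < 32 := by
        unfold pvIsTerm at hterm; rw [hget] at hterm; simpa using hterm
      simp only [pvLoopA, hget]
      rw [if_pos hc]
      have hdig : pvDig t idx = PySem.Int.band ((c.toNat : Int) - 63) 31 := by
        simp [pvDig, hget]
      rw [pv_lor_shift _ _ shift hnum0 (pv_band31 _).1 hnumlt, pvH_single, hdig]
    · -- idx < j : continuation step
      obtain ⟨hsome, hnt⟩ := h3 idx (le_refl _) hlt
      obtain ⟨c, hget⟩ := Option.isSome_iff_exists.mp hsome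
      have hc : ¬ ((c.toNat : Int) - 63 < 32) := by
        unfold pvIsTerm at hnt; rw [hget] at hnt; simpa using hnt
      simp only [pvLoopA, hget]
      rw [if_neg hc]
      have hb := pv_band31 ((c.toNat : Int) - 63)
      have hnum' := pv_lor_shift num (PySem.Int.band ((c.toNat : Int) - 63) 31) shift hnum0 hb.1 hnumlt
      rw [ih (idx + 1) _ (shift + 5) (by omega) (by push_cast at h2 ⊢; omega)
          (by rw [hnum']; have := hb.1; positivity)
          (by rw [hnum']; have : (2:Int) ^ (shift + 5) = 2 ^ shift * 32 := by ring
              rw [this]; nlinarith)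
          (fun k hk1 hk2 => h3 k (by omega) hk2)]
      have hdig : pvDig t idx = PySem.Int.band ((c.toNat : Int) - 63) 31 := by
        simp [pvDig, hget]
      rw [hnum', pvH_cons t idx j (by omega), hdig]
      have : (2:Int) ^ (shift + 5) = 2 ^ shift * 32 := by ring
      rw [this]
      ring_nf

-- ===== VERDICT (by name: the statement is the Claim_ definition above) =====
theorem decompress_number_spec : Claim_equal_decompress_number := by
  intro text index _ hpre
  obtain ⟨hlo, j0, hj0mem, hj0term⟩ := hpre
  rw [PySem.List.mem_pyRange_one] at hj0mem
  unfold Spec_decompress_number decompress_number decompress_number_alt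
  obtain ⟨j, hscan⟩ := pvScan_complete text.toList (2 * text.toList.length + 1) index j0
    hlo hj0mem.1 hj0mem.2 hj0term (by push_cast; omega)
  obtain ⟨h1, _, hterm, h3⟩ := pvScan_sound text.toList _ _ _ hscan
  have hrun := pvLoopA_run text.toList j hterm (2 * text.toList.length + 1) index 0 0
    h1 (by have := (pvScan_sound text.toList _ _ _ hscan).2.1; push_cast at this ⊢; omega)
    (le_refl 0) (by norm_num) h3
  rw [hrun]
  simp only [hscan, pvB_fold]
  norm_num
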